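-- pv_equiv track=rewrite | github.com/AlexTyl/Python-learning | Taskes/Task3.03.py | max_and_min_elements_those_rows_that_ordered
-- ===== SOURCE A (Python) =====
-- def check_ascending_order(array):
--     current_index = 0
--     while current_index < len(array) - 1:
--         if array[current_index] > array[current_index + 1]:
--             return False
--         current_index += 1
--     return True
--
-- def check_descending_order(array):
--     current_index = 0
--     while current_index < len(array) - 1:
--         if array[current_index] < array[current_index + 1]:
--             return False
--         current_index += 1
--     return True
--
-- def max_and_min_elements_those_rows_that_ordered(matrix):
--     max_and_min = ""
--     for i in range(len(matrix)):
--         if check_ascending_order(matrix[i]):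
--             max_and_min += str(i+1) + " row is ascending: max " + str(matrix[i][len(matrix[i]) - 1]) + "; min " \
--                            + str(matrix[i][0]) + "\n"
--         elif check_descending_order(matrix[i]):
--             max_and_min += str(i+1) + " row is descending: max " + str(matrix[i][0]) + "; min " \
--                            + str(matrix[i][len(matrix[i]) - 1]) + "\n"
--     return max_and_min
-- ===== SOURCE B (Python) =====
-- def max_and_min_elements_those_rows_that_ordered(matrix):
--     lines = []
--     for i, row in enumerate(matrix, 1):
--         if sorted(row) == row:
--             lines.append(f"{i} row is ascending: max {row[-1]}; min {row[0]}\n")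
--         elif sorted(row, reverse=True) == row:
--             lines.append(f"{i} row is descending: max {row[0]}; min {row[-1]}\n")
--     return "".join(lines)
-- ===== Notes on version B (the rewrite author's own statement) =====
-- stated objective: simpler
-- what changed: Replaced the two index-based while-loop scanning helpers with sorted-equality checks (sorted(row)==row / sorted(row,reverse=True)==row) inside a single enumerate loop that collects lines in a list and joins them, instead of repeated string concatenation over range(len(matrix)).
import Mathlib
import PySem

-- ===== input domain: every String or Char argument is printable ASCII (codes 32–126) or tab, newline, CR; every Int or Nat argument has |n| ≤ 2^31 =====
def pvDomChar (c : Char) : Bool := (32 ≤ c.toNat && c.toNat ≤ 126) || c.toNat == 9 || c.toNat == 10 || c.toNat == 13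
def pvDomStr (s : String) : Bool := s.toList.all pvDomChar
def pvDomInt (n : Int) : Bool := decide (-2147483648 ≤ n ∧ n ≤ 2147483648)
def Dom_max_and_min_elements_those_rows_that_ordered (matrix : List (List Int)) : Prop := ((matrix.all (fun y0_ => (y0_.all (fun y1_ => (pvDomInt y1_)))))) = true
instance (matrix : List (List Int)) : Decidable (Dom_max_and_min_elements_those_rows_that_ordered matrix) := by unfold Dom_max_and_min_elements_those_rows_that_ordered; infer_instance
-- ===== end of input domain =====

-- B replaces the index-scanning order checks by sorted-equality tests and joins collected lines (objective: simpler).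

-- ===== PORT A =====
-- while loop of check_ascending_order; indices are always in range, so getD is exact;
-- fuel = array.length bounds the loop (the while condition stops it earlier), structural recursion only
def check_ascending_order_aux (array : List Int) (i : Nat) : Nat → Bool
  | 0 => true
  | fuel + 1 =>
    if i < array.length - 1 then
      if array.getD i 0 > array.getD (i+1) 0 then false
      else check_ascending_order_aux array (i+1) fuel
    else true

def check_ascending_order (array : List Int) : Bool := check_ascending_order_aux array 0 array.length

def check_descending_order_aux (array : List Int) (i : Nat) : Nat → Bool
  | 0 => true
  | fuel + 1 =>
    if i < array.length - 1 then
      if array.getD i 0 < array.getD (i+1) 0 then false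
      else check_descending_order_aux array (i+1) fuel
    else true

def check_descending_order (array : List Int) : Bool := check_descending_order_aux array 0 array.length

-- matrix[i][len-1] raises IndexError on an empty row in Python; Pre_ excludes those inputs, the default is never used inside Pre_
def max_and_min_elements_those_rows_that_ordered (matrix : List (List Int)) : String :=
  (PySem.List.pyRange 0 (matrix.length : Int) 1).foldl (fun acc j =>
    let row := PySem.List.pyGetD matrix j []
    if check_ascending_order row then
      acc ++ (PySem.Int.toStr (j+1) ++ " row is ascending: max " ++
        PySem.Int.toStr (PySem.List.pyGetD row ((row.length : Int) - 1) 0) ++ "; min " ++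
        PySem.Int.toStr (PySem.List.pyGetD row 0 0) ++ "\n")
    else if check_descending_order row then
      acc ++ (PySem.Int.toStr (j+1) ++ " row is descending: max " ++
        PySem.Int.toStr (PySem.List.pyGetD row 0 0) ++ "; min " ++
        PySem.Int.toStr (PySem.List.pyGetD row ((row.length : Int) - 1) 0) ++ "\n")
    else acc) ""

-- ===== PORT B =====
def max_and_min_elements_those_rows_that_ordered_alt (matrix : List (List Int)) : String :=
  String.join ((PySem.List.enumerate matrix 1).foldl (fun lines p =>
    let i := p.1
    let row := p.2
    if PySem.List.sorted row (fun x => x) false = row then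
      lines ++ [PySem.Int.toStr i ++ " row is ascending: max " ++
        PySem.Int.toStr (PySem.List.pyGetD row (-1) 0) ++ "; min " ++
        PySem.Int.toStr (PySem.List.pyGetD row 0 0) ++ "\n"]
    else if PySem.List.sorted row (fun x => x) true = row then
      lines ++ [PySem.Int.toStr i ++ " row is descending: max " ++
        PySem.Int.toStr (PySem.List.pyGetD row 0 0) ++ "; min " ++
        PySem.Int.toStr (PySem.List.pyGetD row (-1) 0) ++ "\n"]
    else lines) [])

-- ===== PRECONDITION & SPEC =====
-- Pre_ excludes matrices containing an empty row: Python A raises IndexError there (row[-1]); Python B raises too.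
def Pre_max_and_min_elements_those_rows_that_ordered (matrix : List (List Int)) : Prop :=
  (matrix.all (fun row => !row.isEmpty)) = true
instance (matrix : List (List Int)) : Decidable (Pre_max_and_min_elements_those_rows_that_ordered matrix) := by unfold Pre_max_and_min_elements_those_rows_that_ordered; infer_instance

def pvWitness_max_and_min_elements_those_rows_that_ordered : List (List Int) := [[1, 2, 3], [3, 2, 1], [1, 3, 2], [5]]

def Spec_max_and_min_elements_those_rows_that_ordered (matrix : List (List Int)) (out : String) : Prop := out = max_and_min_elements_those_rows_that_ordered_alt matrix
instance (matrix : List (List Int)) (out : String) : Decidable (Spec_max_and_min_elements_those_rows_that_ordered matrix out) := by unfold Spec_max_and_min_elements_those_rows_that_ordered; infer_instance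

-- ===== CLAIM (what is proved, stated in full; the proofs are below) =====
def Claim_equal_max_and_min_elements_those_rows_that_ordered : Prop := ∀ (matrix : List (List Int)), Dom_max_and_min_elements_those_rows_that_ordered matrix → Pre_max_and_min_elements_those_rows_that_ordered matrix → Spec_max_and_min_elements_those_rows_that_ordered matrix (max_and_min_elements_those_rows_that_ordered matrix)

-- ===== LEMMAS AND PROOFS =====

-- structural adjacent-order checks
def ascB : List Int → Bool
  | [] => true
  | [_] => true
  | a :: b :: t => (a ≤ b) && ascB (b :: t)

def descB : List Int → Bool
  | [] => true
  | [_] => true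
  | a :: b :: t => (b ≤ a) && descB (b :: t)

lemma ascAux_eq (l : List Int) (i : Nat) (fuel : Nat) (hf : l.length - 1 - i ≤ fuel) :
    check_ascending_order_aux l i fuel = ascB (l.drop i) := by
  induction fuel generalizing i with
  | zero =>
      have h : ¬ i < l.length - 1 := by omega
      have hlen : (l.drop i).length ≤ 1 := by simp; omega
      match hd : l.drop i with
      | [] => simp [check_ascending_order_aux, ascB]
      | [_] => simp [check_ascending_order_aux, ascB]
      | a :: b :: t => rw [hd] at hlen; simp at hlen
  | succ fuel ih =>
      rw [check_ascending_order_aux]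
      by_cases h : i < l.length - 1
      · have hi : i < l.length := by omega
        have hi1 : i + 1 < l.length := by omega
        rw [List.drop_eq_getElem_cons hi, List.drop_eq_getElem_cons hi1]
        have ihh := ih (i+1) (by omega)
        rw [List.drop_eq_getElem_cons hi1] at ihh
        simp only [ascB]
        by_cases hgt : l.getD i 0 > l.getD (i+1) 0
        · have hle : ¬ (l[i] ≤ l[i+1]) := by
            simpa [List.getD_eq_getElem?_getD, List.getElem?_eq_getElem hi, List.getElem?_eq_getElem hi1] using hgt
          simp [h, List.getElem?_eq_getElem hi, List.getElem?_eq_getElem hi1, hle]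
        · have hle : l[i] ≤ l[i+1] := by
            have := hgt
            simp [List.getD_eq_getElem?_getD, List.getElem?_eq_getElem hi, List.getElem?_eq_getElem hi1] at this
            omega
          simp [h, List.getElem?_eq_getElem hi, List.getElem?_eq_getElem hi1, hle, ihh]
      · have hlen : (l.drop i).length ≤ 1 := by simp; omega
        match hd : l.drop i with
        | [] => simp [h, ascB]
        | [_] => simp [h, ascB]
        | a :: b :: t => rw [hd] at hlen; simp at hlen

lemma descAux_eq (l : List Int) (i : Nat) (fuel : Nat) (hf : l.length - 1 - i ≤ fuel) :
    check_descending_order_aux l i fuel = descB (l.drop i) := by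
  induction fuel generalizing i with
  | zero =>
      have h : ¬ i < l.length - 1 := by omega
      have hlen : (l.drop i).length ≤ 1 := by simp; omega
      match hd : l.drop i with
      | [] => simp [check_descending_order_aux, descB]
      | [_] => simp [check_descending_order_aux, descB]
      | a :: b :: t => rw [hd] at hlen; simp at hlen
  | succ fuel ih =>
      rw [check_descending_order_aux]
      by_cases h : i < l.length - 1
      · have hi : i < l.length := by omega
        have hi1 : i + 1 < l.length := by omega
        rw [List.drop_eq_getElem_cons hi, List.drop_eq_getElem_cons hi1]
        have ihh := ih (i+1) (by omega)
        rw [List.drop_eq_getElem_cons hi1] at ihh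
        simp only [descB]
        by_cases hgt : l.getD i 0 < l.getD (i+1) 0
        · have hle : ¬ (l[i+1] ≤ l[i]) := by
            simpa [List.getD_eq_getElem?_getD, List.getElem?_eq_getElem hi, List.getElem?_eq_getElem hi1] using hgt
          simp [h, List.getElem?_eq_getElem hi, List.getElem?_eq_getElem hi1, hle]
        · have hle : l[i+1] ≤ l[i] := by
            have := hgt
            simp [List.getD_eq_getElem?_getD, List.getElem?_eq_getElem hi, List.getElem?_eq_getElem hi1] at this
            omega
          simp [h, List.getElem?_eq_getElem hi, List.getElem?_eq_getElem hi1, hle, ihh]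
      · have hlen : (l.drop i).length ≤ 1 := by simp; omega
        match hd : l.drop i with
        | [] => simp [h, descB]
        | [_] => simp [h, descB]
        | a :: b :: t => rw [hd] at hlen; simp at hlen

lemma ascB_iff_chain (l : List Int) : ascB l = true ↔ List.IsChain (· ≤ ·) l := by
  match l with
  | [] => simp [ascB]
  | [_] => simp [ascB]
  | a :: b :: t =>
      simp only [ascB, Bool.and_eq_true, decide_eq_true_eq, List.isChain_cons,
        List.head?_cons, Option.mem_some_iff]
      rw [← List.isChain_cons (x := b) (l := t)]
      constructor
      · rintro ⟨h1, h2⟩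
        exact ⟨by rintro y rfl; exact h1, (ascB_iff_chain (b :: t)).1 h2⟩
      · rintro ⟨h1, h2⟩
        exact ⟨h1 b rfl, (ascB_iff_chain (b :: t)).2 h2⟩

lemma descB_iff_chain (l : List Int) : descB l = true ↔ List.IsChain (fun a b : Int => b ≤ a) l := by
  match l with
  | [] => simp [descB]
  | [_] => simp [descB]
  | a :: b :: t =>
      simp only [descB, Bool.and_eq_true, decide_eq_true_eq, List.isChain_cons,
        List.head?_cons, Option.mem_some_iff]
      rw [← List.isChain_cons (R := fun a b : Int => b ≤ a) (x := b) (l := t)]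
      constructor
      · rintro ⟨h1, h2⟩
        exact ⟨by rintro y rfl; exact h1, (descB_iff_chain (b :: t)).1 h2⟩
      · rintro ⟨h1, h2⟩
        exact ⟨h1 b rfl, (descB_iff_chain (b :: t)).2 h2⟩

lemma chain_le_iff_pairwise (l : List Int) : List.IsChain (· ≤ ·) l ↔ List.Pairwise (· ≤ ·) l :=
  List.isChain_iff_pairwise

lemma chain_ge_iff_pairwise (l : List Int) : List.IsChain (fun a b : Int => b ≤ a) l ↔ List.Pairwise (fun a b : Int => b ≤ a) l :=
  @List.isChain_iff_pairwise _ _ _ ⟨fun h1 h2 => le_trans h2 h1⟩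

lemma asc_iff_sorted (l : List Int) : check_ascending_order l = true ↔ PySem.List.sorted l (fun x => x) false = l := by
  rw [check_ascending_order, ascAux_eq l 0 l.length (by omega), List.drop_zero, ascB_iff_chain, chain_le_iff_pairwise]
  constructor
  · intro h
    exact PySem.List.sorted_eq_self_of_pairwise l (fun x => x) h
  · intro h
    have hp := PySem.List.sorted_pairwise l (fun x : Int => x)
    rw [h] at hp
    exact hp

lemma desc_iff_sorted (l : List Int) : check_descending_order l = true ↔ PySem.List.sorted l (fun x => x) true = l := by
  rw [check_descending_order, descAux_eq l 0 l.length (by omega), List.drop_zero, descB_iff_chain, chain_ge_iff_pairwise]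
  constructor
  · intro h
    exact PySem.List.sorted_rev_eq_self_of_pairwise l (fun x => x) h
  · intro h
    have hp := PySem.List.sorted_pairwise_rev l (fun x : Int => x)
    rw [h] at hp
    exact hp

lemma last_idx_eq (row : List Int) : PySem.List.pyGetD row ((row.length : Int) - 1) 0 = PySem.List.pyGetD row (-1) 0 := by
  match row with
  | [] => rfl
  | a :: t =>
      have hne : (a :: t) ≠ ([] : List Int) := by simp
      rw [PySem.List.pyGetD_neg_one (a :: t) 0 hne]
      have h0 : (0 : Int) ≤ ((a :: t).length : Int) - 1 := by simp
      have h1 : ((a :: t).length : Int) - 1 < ((a :: t).length : Int) := by omega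
      rw [PySem.List.pyGetD_eq_getElem (a :: t) 0 h0 h1]
      have : (((a :: t).length : Int) - 1).toNat = (a :: t).length - 1 := by omega
      simp only [this]
      exact (List.getLast_eq_getElem hne).symm

lemma join_append (ls : List String) (x : String) : String.join (ls ++ [x]) = String.join ls ++ x := by
  simp [String.join, List.foldl_append]

-- loop bodies as named functions
def bodyA (acc : String) (p : Int × List Int) : String :=
  let row := p.2
  if check_ascending_order row then
    acc ++ (PySem.Int.toStr (p.1+1) ++ " row is ascending: max " ++
      PySem.Int.toStr (PySem.List.pyGetD row ((row.length : Int) - 1) 0) ++ "; min " ++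
      PySem.Int.toStr (PySem.List.pyGetD row 0 0) ++ "\n")
  else if check_descending_order row then
    acc ++ (PySem.Int.toStr (p.1+1) ++ " row is descending: max " ++
      PySem.Int.toStr (PySem.List.pyGetD row 0 0) ++ "; min " ++
      PySem.Int.toStr (PySem.List.pyGetD row ((row.length : Int) - 1) 0) ++ "\n")
  else acc

def bodyB (lines : List String) (p : Int × List Int) : List String :=
  let row := p.2
  if PySem.List.sorted row (fun x => x) false = row then
    lines ++ [PySem.Int.toStr p.1 ++ " row is ascending: max " ++
      PySem.Int.toStr (PySem.List.pyGetD row (-1) 0) ++ "; min " ++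
      PySem.Int.toStr (PySem.List.pyGetD row 0 0) ++ "\n"]
  else if PySem.List.sorted row (fun x => x) true = row then
    lines ++ [PySem.Int.toStr p.1 ++ " row is descending: max " ++
      PySem.Int.toStr (PySem.List.pyGetD row 0 0) ++ "; min " ++
      PySem.Int.toStr (PySem.List.pyGetD row (-1) 0) ++ "\n"]
  else lines

lemma loop_eq (m : List (List Int)) (s : Int) (acc : String) (ls : List String)
    (hacc : acc = String.join ls) :
    (PySem.List.enumerate m s).foldl bodyA acc =
      String.join ((PySem.List.enumerate m (s+1)).foldl bodyB ls) := by
  induction m generalizing s acc ls with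
  | nil => simpa [PySem.List.enumerate_nil] using hacc
  | cons row t ih =>
      rw [PySem.List.enumerate_cons, PySem.List.enumerate_cons, List.foldl_cons, List.foldl_cons]
      apply ih
      simp only [bodyA, bodyB]
      by_cases ha : check_ascending_order row
      · have hs : PySem.List.sorted row (fun x => x) false = row := (asc_iff_sorted row).1 ha
        simp [ha, hs, join_append, hacc, last_idx_eq]
      · have hs : ¬ PySem.List.sorted row (fun x => x) false = row := by
          intro h; exact ha ((asc_iff_sorted row).2 h)
        by_cases hd : check_descending_order row
        · have hs2 : PySem.List.sorted row (fun x => x) true = row := (desc_iff_sorted row).1 hd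
          simp [ha, hs, hd, hs2, join_append, hacc, last_idx_eq]
        · have hs2 : ¬ PySem.List.sorted row (fun x => x) true = row := by
            intro h; exact hd ((desc_iff_sorted row).2 h)
          simp [ha, hs, hd, hs2, hacc]

lemma portA_eq_enum (matrix : List (List Int)) :
    max_and_min_elements_those_rows_that_ordered matrix =
      (PySem.List.enumerate matrix 0).foldl bodyA "" := by
  rw [max_and_min_elements_those_rows_that_ordered,
      PySem.List.enumerate_eq_map_pyRange (xs := matrix) (d := []), List.foldl_map]
  rfl

lemma portB_eq_enum (matrix : List (List Int)) :
    max_and_min_elements_those_rows_that_ordered_alt matrix =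
      String.join ((PySem.List.enumerate matrix 1).foldl bodyB []) := rfl

lemma ports_eq (matrix : List (List Int)) :
    max_and_min_elements_those_rows_that_ordered matrix =
      max_and_min_elements_those_rows_that_ordered_alt matrix := by
  rw [portA_eq_enum, portB_eq_enum]
  have := loop_eq matrix 0 "" [] rfl
  simpa using this

-- ===== VERDICT (by name: the statement is the Claim_ definition above) =====
theorem max_and_min_elements_those_rows_that_ordered_spec : Claim_equal_max_and_min_elements_those_rows_that_ordered := by
  intro matrix _ _
  unfold Spec_max_and_min_elements_those_rows_that_ordered
  exact ports_eq matrix
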